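-- pv_equiv track=rewrite | github.com/JRAnthonyrajah/polygon-ui | styles/theme_css.py | extract_critical_css
-- ===== SOURCE A (Python) =====
-- from typing import Dict, Any, Optional, List, Tuple
--
-- def extract_critical_css(css: str, above_fold_selectors: List[str]) -> str:
--     """
--     Extract critical CSS for above-the-fold content.
--
--     Args:
--         css: Full CSS
--         above_fold_selectors: Selectors that are above the fold
--
--     Returns:
--         Critical CSS
--     """
--     lines = css.split("\n")
--     critical_lines = []
--     capture = False
--     brace_count = 0
--
--     for line in lines:
--         # Check if line matches a critical selector
--         if any(selector in line for selector in above_fold_selectors):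
--             capture = True
--
--         if capture:
--             critical_lines.append(line)
--             brace_count += line.count("{") - line.count("}")
--
--             if brace_count == 0:
--                 capture = False
--
--     return "\n".join(critical_lines)
-- ===== SOURCE B (Python) =====
-- def extract_critical_css(css, above_fold_selectors):
--     """
--     Extract critical CSS for above-the-fold content.
--
--     Prefix-sum rewrite: the brace counter disappears from the selection pass.
--     Stage 1 computes brace-depth prefix sums per line; stage 2 precomputes, via
--     one right-to-left dict pass, each line's block end (the first later position
--     where the prefix sum returns to its value); stage 3 selects whole blocks by
--     slicing at those precomputed ends.
--     """
--     lines = css.split("\n")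
--     n = len(lines)
--     prefix = [0]
--     for line in lines:
--         prefix.append(prefix[-1] + line.count("{") - line.count("}"))
--     # stop[i] = exclusive end of the block starting at line i: the smallest
--     # k > i with prefix[k] == prefix[i], or n if the block never closes.
--     pos = {}
--     stop = [n] * n
--     for i in range(n - 1, -1, -1):
--         pos[prefix[i + 1]] = i + 1
--         stop[i] = pos.get(prefix[i], n)
--     out = []
--     i = 0
--     while i < n:
--         if any(sel in lines[i] for sel in above_fold_selectors):
--             k = stop[i]
--             out.extend(lines[i:k])
--             i = k
--         else:
--             i += 1
--     return "\n".join(out)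
-- ===== Notes on version B (the rewrite author's own statement) =====
-- stated objective: alternative
-- what changed: Replaced A's single-pass flag-and-brace-counter state machine with staged passes: compute per-line brace-depth prefix sums, precompute each line's block end in one right-to-left dict pass (first later index where the prefix sum returns to its value), then select blocks by slicing at the precomputed ends with no brace counter in the selection loop.
import Mathlib
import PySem

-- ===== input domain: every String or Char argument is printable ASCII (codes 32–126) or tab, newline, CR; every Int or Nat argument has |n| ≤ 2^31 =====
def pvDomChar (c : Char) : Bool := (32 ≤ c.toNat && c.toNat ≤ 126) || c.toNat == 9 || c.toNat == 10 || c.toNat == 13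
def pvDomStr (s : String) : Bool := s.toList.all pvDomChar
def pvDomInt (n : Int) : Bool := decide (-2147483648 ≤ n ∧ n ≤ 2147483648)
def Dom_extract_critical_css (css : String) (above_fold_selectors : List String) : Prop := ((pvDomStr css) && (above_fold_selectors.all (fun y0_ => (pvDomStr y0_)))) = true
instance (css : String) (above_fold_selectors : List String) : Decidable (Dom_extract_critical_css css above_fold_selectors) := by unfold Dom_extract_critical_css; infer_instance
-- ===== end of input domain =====

-- B replaces A's one-pass flag state machine by staged passes: brace-depth prefix sums,
-- a right-to-left dict pass precomputing each line's block end, then block slicing (same cost, different algorithm).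

-- shared by both ports: line.count("{") - line.count("}")
def pvDelta (l : String) : Int := (PySem.Str.count l "{" : Int) - (PySem.Str.count l "}" : Int)

-- ===== PORT A =====
-- one iteration of A's flat loop: state = (critical_lines, capture, brace_count)
def pvAStep (above_fold_selectors : List String) (st : List String × Bool × Int) (line : String) :
    List String × Bool × Int :=
  let capture := if above_fold_selectors.any (fun sel => PySem.Str.isIn sel line) then true else st.2.1
  if capture then
    let brace := st.2.2 + pvDelta line
    (st.1 ++ [line], if brace = 0 then false else true, brace)
  else
    (st.1, capture, st.2.2)

def extract_critical_css (css : String) (above_fold_selectors : List String) : String :=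
  let lines := (PySem.Str.split? css "\n").getD []   -- css.split("\n"); sep ≠ "" so split? is some
  let res := lines.foldl (pvAStep above_fold_selectors) ([], false, 0)
  PySem.Str.join "\n" res.1

-- ===== PORT B =====
-- stage 1: prefix = [0]; for line in lines: prefix.append(prefix[-1] + line.count("{") - line.count("}"))
def pvPrefix (lines : List String) : List Int :=
  lines.foldl (fun p line => p ++ [p.getLast?.getD 0 + pvDelta line]) [0]

-- stage 2: for i in range(n-1, -1, -1): pos[prefix[i+1]] = i+1; stop[i] = pos.get(prefix[i], n)
-- (built by prepending, since Python fills stop from the right end down)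
def pvStopAux (pre : List Int) (n : Int) : Nat → PySem.Dict Int Int → List Int → List Int
  | 0, _, stop => stop
  | i+1, pos, stop =>
    let pos' := pos.insert (pre.getD (i+1) 0) ((i : Int) + 1)
    pvStopAux pre n i pos' (pos'.getD (pre.getD i 0) n :: stop)

-- stage 3: the while loop over i; fuel = n makes the recursion structural (i rises by ≥ 1 each pass)
def pvSelect (lines : List String) (stop : List Int) (sels : List String) : Nat → Nat → List String
  | 0, _ => []
  | fuel+1, i =>
    if i < lines.length then
      if sels.any (fun sel => PySem.Str.isIn sel (lines.getD i "")) then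
        PySem.List.slice lines (some (i : Int)) (some (stop.getD i 0)) ++
          pvSelect lines stop sels fuel (stop.getD i 0).toNat
      else pvSelect lines stop sels fuel (i+1)
    else []

def extract_critical_css_alt (css : String) (above_fold_selectors : List String) : String :=
  let lines := (PySem.Str.split? css "\n").getD []
  let stop := pvStopAux (pvPrefix lines) (lines.length : Int) lines.length PySem.Dict.empty []
  PySem.Str.join "\n" (pvSelect lines stop above_fold_selectors lines.length 0)

-- ===== PRECONDITION & SPEC =====
def Spec_extract_critical_css (css : String) (above_fold_selectors : List String) (out : String) : Prop := out = extract_critical_css_alt css above_fold_selectors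
instance (css : String) (above_fold_selectors : List String) (out : String) : Decidable (Spec_extract_critical_css css above_fold_selectors out) := by unfold Spec_extract_critical_css; infer_instance

-- ===== CLAIM =====
def Claim_equal_extract_critical_css : Prop := ∀ (css : String) (above_fold_selectors : List String), Dom_extract_critical_css css above_fold_selectors → Spec_extract_critical_css css above_fold_selectors (extract_critical_css css above_fold_selectors)

-- ===== LEMMAS AND PROOFS =====

-- proof-only middle model: A's capture phase as a block-consuming recursion
def pvConsume : List String → Int → List String × List String
  | [], _ => ([], [])
  | l :: rest, brace =>
    if brace + pvDelta l = 0 then ([l], rest)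
    else (l :: (pvConsume rest (brace + pvDelta l)).1, (pvConsume rest (brace + pvDelta l)).2)

theorem pvConsume_snd_length : ∀ (xs : List String) (b : Int), (pvConsume xs b).2.length ≤ xs.length := by
  intro xs
  induction xs with
  | nil => intro b; simp [pvConsume]
  | cons l rest ih =>
    intro b
    simp only [pvConsume]
    split
    · simp
    · simpa using Nat.le_succ_of_le (ih _)

def pvScan (above_fold_selectors : List String) : List String → List String
  | [] => []
  | l :: rest =>
    if above_fold_selectors.any (fun sel => PySem.Str.isIn sel l) then
      (pvConsume (l :: rest) 0).1 ++ pvScan above_fold_selectors (pvConsume (l :: rest) 0).2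
    else
      pvScan above_fold_selectors rest
termination_by xs => xs.length
decreasing_by
  · simp only [pvConsume]
    split
    · simp
    · simpa using Nat.lt_succ_of_le (pvConsume_snd_length rest _)
  · simp

-- ---- A = pvScan (A-side lemmas) ----
theorem pvAStep_capture (sels : List String) (acc : List String) (b : Int) (l : String) :
    pvAStep sels (acc, true, b) l
      = (acc ++ [l], if b + pvDelta l = 0 then false else true, b + pvDelta l) := by
  simp only [pvAStep, ite_self, reduceIte]

theorem pvAStep_trig (sels : List String) (acc : List String) (b : Int) (l : String)
    (h : sels.any (fun sel => PySem.Str.isIn sel l) = true) :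
    pvAStep sels (acc, false, b) l
      = (acc ++ [l], if b + pvDelta l = 0 then false else true, b + pvDelta l) := by
  simp only [pvAStep, h]; simp

theorem pvAStep_skip (sels : List String) (acc : List String) (b : Int) (l : String)
    (h : sels.any (fun sel => PySem.Str.isIn sel l) = false) :
    pvAStep sels (acc, false, b) l = (acc, false, b) := by
  simp only [pvAStep, h]; simp

theorem pvAStep_fst (sels : List String) (acc : List String) (cap : Bool) (b : Int) (l : String) :
    pvAStep sels (acc, cap, b) l
      = (acc ++ (pvAStep sels ([], cap, b) l).1, (pvAStep sels ([], cap, b) l).2) := by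
  simp only [pvAStep]
  by_cases hc : (if (sels.any fun sel => PySem.Str.isIn sel l) = true then true else cap) = true
  · rw [if_pos hc, if_pos hc]; simp
  · rw [if_neg hc, if_neg hc]; simp

theorem pvFold_acc (sels : List String) :
    ∀ (xs acc : List String) (cap : Bool) (b : Int),
      (xs.foldl (pvAStep sels) (acc, cap, b)).1
        = acc ++ (xs.foldl (pvAStep sels) ([], cap, b)).1 := by
  intro xs
  induction xs with
  | nil => intro acc cap b; simp
  | cons l rest ih =>
    intro acc cap b
    rw [List.foldl_cons, List.foldl_cons, pvAStep_fst]
    rcases h : pvAStep sels ([], cap, b) l with ⟨f, cap', b'⟩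
    rw [ih (acc ++ f) cap' b', ih f cap' b', List.append_assoc]

theorem pvFold_capture (sels : List String) :
    ∀ (xs : List String) (b : Int) (acc : List String),
      (xs.foldl (pvAStep sels) (acc, true, b)).1 =
        acc ++ (pvConsume xs b).1 ++
          (((pvConsume xs b).2).foldl (pvAStep sels) ([], false, 0)).1 := by
  intro xs
  induction xs with
  | nil => intro b acc; simp [pvConsume]
  | cons l rest ih =>
    intro b acc
    rw [List.foldl_cons, pvAStep_capture]
    by_cases h0 : b + pvDelta l = 0
    · simp only [pvConsume, h0]
      rw [pvFold_acc]
      simp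
    · simp only [pvConsume, if_neg h0]
      rw [ih (b + pvDelta l) (acc ++ [l])]
      simp

theorem pvFold_eq_scan (sels : List String) :
    ∀ (xs acc : List String),
      (xs.foldl (pvAStep sels) (acc, false, 0)).1 = acc ++ pvScan sels xs := by
  intro xs
  induction xs using pvScan.induct sels with
  | case1 => intro acc; simp [pvScan]
  | case2 l rest htrig ih =>
    intro acc
    rw [pvScan]
    simp only [htrig, if_pos]
    rw [List.foldl_cons, pvAStep_trig sels acc 0 l htrig]
    by_cases h0 : (0 : Int) + pvDelta l = 0
    · simp only [pvConsume, if_pos h0] at ih ⊢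
      simp only [h0]
      rw [ih, List.append_assoc]
    · simp only [pvConsume, if_neg h0] at ih ⊢
      rw [pvFold_capture sels rest (0 + pvDelta l) (acc ++ [l])]
      rw [ih]
      simp
  | case3 l rest htrig ih =>
    intro acc
    have htrig' : (sels.any fun sel => PySem.Str.isIn sel l) = false := by
      simpa using htrig
    rw [pvScan, if_neg htrig, List.foldl_cons, pvAStep_skip sels acc 0 l htrig']
    exact ih acc

-- ---- B = pvScan (B-side lemmas) ----

-- proof-only: the length of the block pvConsume takes, computed on the deltas alone
def pvCut : List Int → Int → Nat
  | [], _ => 0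
  | d :: rest, b => if b + d = 0 then 1 else 1 + pvCut rest (b + d)

theorem pvConsume_eq_cut : ∀ (xs : List String) (b : Int),
    pvConsume xs b = (xs.take (pvCut (xs.map pvDelta) b), xs.drop (pvCut (xs.map pvDelta) b)) := by
  intro xs
  induction xs with
  | nil => intro b; simp [pvConsume, pvCut]
  | cons l rest ih =>
    intro b
    simp only [pvConsume, List.map_cons, pvCut]
    by_cases h0 : b + pvDelta l = 0
    · simp [h0]
    · simp only [if_neg h0, ih (b + pvDelta l)]
      simp [Nat.add_comm 1]

theorem pvCut_pos (l : String) (rest : List String) (b : Int) :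
    1 ≤ pvCut ((l :: rest).map pvDelta) b := by
  simp only [List.map_cons, pvCut]
  split <;> omega

-- presum j = prefix[j]
theorem pvPrefix_eq (lines : List String) :
    pvPrefix lines = (List.range (lines.length + 1)).map (fun j => ((lines.take j).map pvDelta).sum) := by
  induction lines using List.reverseRecOn with
  | nil => simp [pvPrefix]
  | append_singleton ys l ih =>
    unfold pvPrefix at ih ⊢
    rw [List.foldl_append, ih, List.foldl_cons, List.foldl_nil]
    rw [List.length_append, List.length_singleton,
        show ys.length + 1 + 1 = (ys.length + 1) + 1 from rfl,
        List.range_succ (n := ys.length + 1), List.map_append]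
    congr 1
    · apply List.map_congr_left
      intro j hj
      rw [List.mem_range] at hj
      rw [List.take_append_of_le_length (by omega)]
    · have hlast : ((List.range (ys.length + 1)).map
          (fun j => ((ys.take j).map pvDelta).sum)).getLast?.getD 0
          = ((ys.take ys.length).map pvDelta).sum := by
        rw [List.range_succ, List.map_append]
        simp
        rw [List.take_of_length_le (by simp)]
      rw [hlast]
      simp

-- stopSpec: smallest k in (i, n] where the prefix sum returns to its value at i, else n
def pvStopSpec (ds : List Int) (i : Nat) : Nat :=
  (((List.range' (i+1) (ds.length - i)).find?
      (fun k => (ds.take k).sum == (ds.take i).sum)).getD ds.length)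

theorem pvCut_eq_spec (ds : List Int) :
    ∀ m i, i ≤ m → m ≤ ds.length →
      m + pvCut (ds.drop m) ((ds.take m).sum - (ds.take i).sum)
        = ((List.range' (m+1) (ds.length - m)).find?
            (fun k => (ds.take k).sum == (ds.take i).sum)).getD ds.length := by
  suffices H : ∀ t m i, i ≤ m → m ≤ ds.length → ds.length - m = t →
      m + pvCut (ds.drop m) ((ds.take m).sum - (ds.take i).sum)
        = ((List.range' (m+1) (ds.length - m)).find?
            (fun k => (ds.take k).sum == (ds.take i).sum)).getD ds.length by
    intro m i h1 h2
    exact H (ds.length - m) m i h1 h2 rfl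
  intro t
  induction t with
  | zero =>
    intro m i h1 h2 ht
    have hm : m = ds.length := by omega
    subst hm
    simp [pvCut, List.drop_length]
  | succ t ih =>
    intro m i h1 h2 ht
    have hm : m < ds.length := by omega
    have hdrop : ds.drop m = ds[m] :: ds.drop (m+1) := List.drop_eq_getElem_cons hm
    have hsum : (ds.take (m+1)).sum = (ds.take m).sum + ds[m] := by
      rw [List.take_add_one, List.sum_append]
      simp [List.getElem?_eq_getElem hm]
    have hrange : List.range' (m+1) (ds.length - m)
        = (m+1) :: List.range' (m+2) (ds.length - (m+1)) := by
      have : ds.length - m = (ds.length - (m+1)) + 1 := by omega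
      rw [this, List.range'_succ]
    rw [hdrop, hrange]
    simp only [pvCut]
    by_cases hc : (ds.take m).sum - (ds.take i).sum + ds[m] = 0
    · have hb : (fun k => (ds.take k).sum == (ds.take i).sum) (m+1) = true := by
        simp only [beq_iff_eq, hsum]; omega
      rw [show List.find? (fun k => (ds.take k).sum == (ds.take i).sum)
            ((m+1) :: List.range' (m+2) (ds.length - (m+1))) = some (m+1)
          from List.find?_cons_of_pos hb, if_pos hc]
      simp
    · have hb : (fun k => (ds.take k).sum == (ds.take i).sum) (m+1) = false := by
        simp only [beq_eq_false_iff_ne, hsum]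
        intro h; omega
      rw [show List.find? (fun k => (ds.take k).sum == (ds.take i).sum)
            ((m+1) :: List.range' (m+2) (ds.length - (m+1)))
            = List.find? (fun k => (ds.take k).sum == (ds.take i).sum)
                (List.range' (m+2) (ds.length - (m+1)))
          from List.find?_cons_of_neg (by simp only [hb]; exact Bool.false_ne_true), if_neg hc]
      have := ih (m+1) i (by omega) (by omega) (by omega)
      rw [show (ds.take m).sum - (ds.take i).sum + ds[m]
            = (ds.take (m+1)).sum - (ds.take i).sum by omega]
      simp only [show m+1+1 = m+2 from rfl] at this
      omega

-- find? only looks at members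
theorem pvFind_congr {p q : Nat → Bool} : ∀ (l : List Nat), (∀ x ∈ l, p x = q x) → l.find? p = l.find? q := by
  intro l
  induction l with
  | nil => intro _; rfl
  | cons a l ih =>
    intro h
    rw [List.find?_cons, List.find?_cons, h a (by simp)]
    cases q a
    · exact ih (fun x hx => h x (by simp [hx]))
    · rfl

theorem pvPre_getD (lines : List String) (k : Nat) (hk : k ≤ lines.length) :
    (pvPrefix lines).getD k 0 = ((lines.take k).map pvDelta).sum := by
  rw [pvPrefix_eq, List.getD_eq_getElem?_getD, List.getElem?_map, List.getElem?_range (by omega)]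
  rfl

theorem pvStopAux_inv (pre : List Int) (nN : Nat) :
    ∀ (m : Nat) (pos : PySem.Dict Int Int) (acc : List Int), m ≤ nN →
      (∀ v : Int, pos.get? v
          = ((List.range' (m+1) (nN - m)).find? (fun k => pre.getD k 0 == v)).map (fun k => (k : Int))) →
      pvStopAux pre (nN : Int) m pos acc
        = (List.range m).map (fun i =>
            (((List.range' (i+1) (nN - i)).find? (fun k => pre.getD k 0 == pre.getD i 0)).map
              (fun k => (k : Int))).getD (nN : Int)) ++ acc := by
  intro m
  induction m with
  | zero => intro pos acc _ _; simp [pvStopAux]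
  | succ m ih =>
    intro pos acc hm hpos
    simp only [pvStopAux]
    have hrange : List.range' (m+1) (nN - m)
        = (m+1) :: List.range' (m+2) (nN - (m+1)) := by
      have : nN - m = (nN - (m+1)) + 1 := by omega
      rw [this, List.range'_succ]
    have hpos' : ∀ v : Int,
        (pos.insert (pre.getD (m+1) 0) ((m : Int) + 1)).get? v
          = ((List.range' (m+1) (nN - m)).find? (fun k => pre.getD k 0 == v)).map (fun k => (k : Int)) := by
      intro v
      rw [hrange, List.find?_cons, PySem.Dict.get?_insert]
      by_cases hv : v = pre.getD (m+1) 0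
      · rw [if_pos hv, hv]
        simp
      · rw [if_neg hv]
        have : (pre.getD (m+1) 0 == v) = false := by
          simp [beq_eq_false_iff_ne]
          exact fun h => hv h.symm
        rw [this, hpos v]
    rw [ih _ _ (by omega) hpos']
    have hentry : (pos.insert (pre.getD (m+1) 0) ((m : Int) + 1)).getD (pre.getD m 0) (nN : Int)
        = (((List.range' (m+1) (nN - m)).find? (fun k => pre.getD k 0 == pre.getD m 0)).map
            (fun k => (k : Int))).getD (nN : Int) := by
      rw [PySem.Dict.getD_eq_get?_getD, hpos' (pre.getD m 0)]
    rw [hentry, List.range_succ, List.map_append, List.append_assoc]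
    rfl

theorem pvStop_spec (lines : List String) :
    pvStopAux (pvPrefix lines) (lines.length : Int) lines.length PySem.Dict.empty []
      = (List.range lines.length).map (fun i => (pvStopSpec (lines.map pvDelta) i : Int)) := by
  rw [pvStopAux_inv (pvPrefix lines) lines.length lines.length PySem.Dict.empty [] (le_refl _)
        (by intro v; simp [PySem.Dict.get?_empty])]
  rw [List.append_nil]
  apply List.map_congr_left
  intro i hi
  rw [List.mem_range] at hi
  have hfind : (List.range' (i+1) (lines.length - i)).find?
        (fun k => (pvPrefix lines).getD k 0 == (pvPrefix lines).getD i 0)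
      = (List.range' (i+1) ((lines.map pvDelta).length - i)).find?
        (fun k => ((lines.map pvDelta).take k).sum == ((lines.map pvDelta).take i).sum) := by
    rw [List.length_map]
    apply pvFind_congr
    intro k hk
    rw [List.mem_range'_1] at hk
    rw [pvPre_getD lines k (by omega), pvPre_getD lines i (by omega), List.map_take, List.map_take]
  rw [pvStopSpec, ← hfind]
  rcases hc : (List.range' (i+1) (lines.length - i)).find?
      (fun k => (pvPrefix lines).getD k 0 == (pvPrefix lines).getD i 0) with _ | k
  · simp [List.length_map]
  · simp

theorem pvSelect_eq_scan (lines sels : List String) :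
    ∀ (fuel i : Nat), lines.length - i ≤ fuel →
      pvSelect lines ((List.range lines.length).map (fun j => (pvStopSpec (lines.map pvDelta) j : Int))) sels fuel i
        = pvScan sels (lines.drop i) := by
  intro fuel
  induction fuel with
  | zero =>
    intro i hf
    rw [List.drop_eq_nil_of_le (by omega)]
    simp [pvSelect, pvScan]
  | succ fuel ih =>
    intro i hf
    by_cases hi : i < lines.length
    · have hdrop : lines.drop i = lines[i] :: lines.drop (i+1) := List.drop_eq_getElem_cons hi
      have hget : lines.getD i "" = lines[i] := List.getD_eq_getElem lines "" hi
      have hstop : ((List.range lines.length).map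
            (fun j => (pvStopSpec (lines.map pvDelta) j : Int))).getD i 0
          = (pvStopSpec (lines.map pvDelta) i : Int) := by
        rw [List.getD_eq_getElem?_getD, List.getElem?_map, List.getElem?_range hi]
        rfl
      have hK : pvStopSpec (lines.map pvDelta) i
          = i + pvCut ((lines.map pvDelta).drop i) 0 := by
        have := pvCut_eq_spec (lines.map pvDelta) i i (le_refl i) (by simpa using le_of_lt hi)
        rw [sub_self] at this
        rw [pvStopSpec, ← this]
      have hcut1 : 1 ≤ pvCut ((lines.map pvDelta).drop i) 0 := by
        rw [← List.map_drop, hdrop]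
        exact pvCut_pos _ _ _
      simp only [pvSelect, if_pos hi, hget, hstop]
      rw [hdrop, pvScan, ← hdrop]
      by_cases htrig : (sels.any fun sel => PySem.Str.isIn sel lines[i]) = true
      · rw [if_pos htrig, htrig, if_pos rfl]
        have hcons : pvConsume (lines.drop i) 0
            = ((lines.drop i).take (pvCut ((lines.map pvDelta).drop i) 0),
               (lines.drop i).drop (pvCut ((lines.map pvDelta).drop i) 0)) := by
          rw [pvConsume_eq_cut, List.map_drop]
        congr 1
        · rw [hcons, hK]
          rw [show ((i + pvCut ((lines.map pvDelta).drop i) 0 : Nat) : Int)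
                = ((i : Nat) : Int) + ((pvCut ((lines.map pvDelta).drop i) 0 : Nat) : Int) by push_cast; ring]
          rw [PySem.List.slice_natCast_add]
        · rw [hcons, hK]
          have htoNat : ((i + pvCut ((lines.map pvDelta).drop i) 0 : Nat) : Int).toNat
              = i + pvCut ((lines.map pvDelta).drop i) 0 := Int.toNat_natCast _
          rw [htoNat, ih (i + pvCut ((lines.map pvDelta).drop i) 0) (by omega)]
          rw [List.drop_drop]
      · have htrig' : (sels.any fun sel => PySem.Str.isIn sel lines[i]) = false := by
          simpa using htrig
        rw [if_neg htrig, htrig']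
        simp only [Bool.false_eq_true, if_false]
        exact ih (i+1) (by omega)
    · rw [List.drop_eq_nil_of_le (by omega)]
      simp [pvSelect, pvScan, hi]

-- ===== VERDICT =====
theorem extract_critical_css_spec : Claim_equal_extract_critical_css := by
  intro css sels _
  unfold Spec_extract_critical_css
  simp only [extract_critical_css, extract_critical_css_alt]
  rw [pvFold_eq_scan, pvStop_spec,
      pvSelect_eq_scan ((PySem.Str.split? css "\n").getD []) sels _ 0 (by omega)]
  simp
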